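-- pv_equiv track=rewrite | github.com/simonraj79/adk-python | src/google/adk/workflow/_workflow.py | get_common_branch_prefix
-- ===== SOURCE A (Python) =====
-- def get_common_branch_prefix(branches: list[str]) -> str:
--   """Find the common prefix of dot-separated branch strings."""
--   if not branches:
--     return ''
--   split_branches = [b.split('.') if b else [] for b in branches]
--
--   common = []
--   for segments in zip(*split_branches):
--     if len(set(segments)) == 1:
--       common.append(segments[0])
--     else:
--       break
--   return '.'.join(common)
-- ===== SOURCE B (Python) =====
-- def get_common_branch_prefix(branches: list[str]) -> str:
--   """Find the common prefix of dot-separated branch strings."""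
--   if not branches:
--     return ''
--   prefix = branches[0].split('.') if branches[0] else []
--   for b in branches[1:]:
--     if not prefix:
--       break
--     segs = b.split('.') if b else []
--     common = []
--     for x, y in zip(prefix, segs):
--       if x != y:
--         break
--       common.append(x)
--     prefix = common
--   return '.'.join(prefix)
-- ===== Notes on version B (the rewrite author's own statement) =====
-- stated objective: alternative
-- what changed: Instead of transposing all split branches into columns and testing each column's set of segments for size 1, B folds over the branches once, truncating a running prefix list against each branch's segments and stopping early when it becomes empty.
import Mathlib
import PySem

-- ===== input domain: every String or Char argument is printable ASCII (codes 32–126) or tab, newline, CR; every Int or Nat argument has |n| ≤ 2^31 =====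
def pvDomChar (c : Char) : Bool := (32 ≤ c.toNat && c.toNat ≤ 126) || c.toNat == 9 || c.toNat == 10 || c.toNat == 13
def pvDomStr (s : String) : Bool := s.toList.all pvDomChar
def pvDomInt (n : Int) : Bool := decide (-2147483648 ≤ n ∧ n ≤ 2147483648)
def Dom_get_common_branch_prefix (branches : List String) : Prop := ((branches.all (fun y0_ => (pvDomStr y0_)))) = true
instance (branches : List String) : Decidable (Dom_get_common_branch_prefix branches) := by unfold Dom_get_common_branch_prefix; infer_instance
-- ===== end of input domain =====

-- B replaces A's column-wise scan (zip of all split branches + a set per column) by a single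
-- fold that truncates a running prefix against each branch's segments; objective: alternative.

-- ===== PORT A =====
-- b.split('.') if b else []
def pvSplit (b : String) : List String :=
  if b ≠ "" then (PySem.Str.split? b ".").getD [] else []  -- sep "." ≠ "" so split? is always some

-- zip(*split_branches): yields tuples (as lists) column by column until some list is exhausted
def pvZip (ls : List (List String)) : List (List String) :=
  if h : ls = [] ∨ ls.any (·.isEmpty) then []
  else (ls.map (fun l => l.headD "")) :: pvZip (ls.map List.tail)
termination_by (ls.headD []).length
decreasing_by
  push_neg at h
  obtain ⟨h1, h2⟩ := h
  cases ls with
  | nil => exact absurd rfl h1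
  | cons l rest =>
    have hl : l.isEmpty = false := by
      by_contra hc
      exact h2 (by simp [List.any_eq_true]; exact Or.inl (by simpa using hc))
    cases l with
    | nil => simp at hl
    | cons x t => simp

-- the for-loop over the columns: append segments[0] while all segments are equal, else break
def pvALoop : List (List String) → List String → List String
  | [], common => common
  | seg :: rest, common =>
    if PySem.Set.len (PySem.Set.ofList seg) = 1 then
      pvALoop rest (common ++ [seg.headD ""])
    else common

def get_common_branch_prefix (branches : List String) : String :=
  if branches = [] then ""
  else
    let split_branches := branches.map pvSplit
    PySem.Str.join "." (pvALoop (pvZip split_branches) [])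

-- ===== PORT B =====
-- inner loop: common prefix of two segment lists (zip + break at first mismatch)
def pvCp : List String → List String → List String
  | x :: xs, y :: ys => if x = y then x :: pvCp xs ys else []
  | _, _ => []

-- outer loop over branches[1:], with early break when the prefix is empty
def pvBLoop : List String → List String → List String
  | prefix_, [] => prefix_
  | prefix_, b :: rest =>
    if prefix_ = [] then prefix_
    else pvBLoop (pvCp prefix_ (pvSplit b)) rest

def get_common_branch_prefix_alt (branches : List String) : String :=
  match branches with
  | [] => ""
  | b :: rest => PySem.Str.join "." (pvBLoop (pvSplit b) rest)

-- ===== PRECONDITION & SPEC =====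
def Spec_get_common_branch_prefix (branches : List String) (out : String) : Prop := out = get_common_branch_prefix_alt branches
instance (branches : List String) (out : String) : Decidable (Spec_get_common_branch_prefix branches out) := by unfold Spec_get_common_branch_prefix; infer_instance

-- ===== CLAIM (what is proved, stated in full; the proofs are below) =====
def Claim_equal_get_common_branch_prefix : Prop := ∀ (branches : List String), Dom_get_common_branch_prefix branches → Spec_get_common_branch_prefix branches (get_common_branch_prefix branches)

-- ===== LEMMAS AND PROOFS =====

theorem pvCp_nil_left (ys : List String) : pvCp [] ys = [] := by
  cases ys <;> rfl

theorem pvCp_nil_right (xs : List String) : pvCp xs [] = [] := by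
  cases xs <;> rfl

theorem pvCp_prefix_left (xs ys : List String) : pvCp xs ys <+: xs := by
  induction xs generalizing ys with
  | nil => simp [pvCp_nil_left]
  | cons x xt ih =>
    cases ys with
    | nil => simp [pvCp_nil_right]
    | cons y yt =>
      by_cases h : x = y
      · simpa [pvCp, h] using (List.prefix_cons_inj x).mpr (ih yt)
      · simp [pvCp, h]

theorem pvCp_prefix_right (xs ys : List String) : pvCp xs ys <+: ys := by
  induction xs generalizing ys with
  | nil => simp [pvCp_nil_left]
  | cons x xt ih =>
    cases ys with
    | nil => simp [pvCp_nil_right]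
    | cons y yt =>
      by_cases h : x = y
      · subst h
        have := ih yt
        simp only [pvCp]
        exact (List.prefix_cons_inj x).mpr this
      · simp [pvCp, h]

theorem foldl_pvCp_prefix_init (rest : List (List String)) (p : List String) :
    rest.foldl pvCp p <+: p := by
  induction rest generalizing p with
  | nil => simp
  | cons r rs ih => exact (ih (pvCp p r)).trans (pvCp_prefix_left p r)

theorem foldl_pvCp_prefix_mem (rest : List (List String)) (p r : List String) (hr : r ∈ rest) :
    rest.foldl pvCp p <+: r := by
  induction rest generalizing p with
  | nil => cases hr
  | cons s rs ih =>
    rcases List.mem_cons.mp hr with h | h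
    · subst h
      exact (foldl_pvCp_prefix_init rs (pvCp p r)).trans (pvCp_prefix_right p r)
    · exact ih (pvCp p s) h

theorem foldl_pvCp_nil (rest : List (List String)) : rest.foldl pvCp [] = [] := by
  induction rest with
  | nil => rfl
  | cons r rs ih => simpa [pvCp_nil_left] using ih

theorem foldl_pvCp_mem_nil (rest : List (List String)) (p : List String) (h : [] ∈ rest) :
    rest.foldl pvCp p = [] := by
  induction rest generalizing p with
  | nil => cases h
  | cons r rs ih =>
    rcases List.mem_cons.mp h with h' | h'
    · simp [← h', pvCp_nil_right, foldl_pvCp_nil]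
    · exact ih (pvCp p r) h'

theorem foldl_pvCpSplit_nil (rs : List String) :
    rs.foldl (fun acc b => pvCp acc (pvSplit b)) [] = [] := by
  induction rs with
  | nil => rfl
  | cons c cs ih => simpa [pvCp_nil_left] using ih

-- B's loop with its early break is the plain fold
theorem pvBLoop_eq_foldl (rest : List String) (p : List String) :
    pvBLoop p rest = rest.foldl (fun acc b => pvCp acc (pvSplit b)) p := by
  induction rest generalizing p with
  | nil => rfl
  | cons b rs ih =>
    by_cases hp : p = []
    · subst hp
      simp [pvBLoop, pvCp_nil_left, foldl_pvCpSplit_nil]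
    · simp [pvBLoop, hp, ih]

-- A's loop accumulator pulls out as an append
theorem pvALoop_append (cols : List (List String)) (common : List String) :
    pvALoop cols common = common ++ pvALoop cols [] := by
  induction cols generalizing common with
  | nil => simp [pvALoop]
  | cons seg rest ih =>
    by_cases h : PySem.Set.len (PySem.Set.ofList seg) = 1
    · rw [pvALoop, if_pos h, pvALoop, if_pos h, ih, ih ([] ++ [seg.headD ""])]
      simp
    · rw [pvALoop, if_neg h, pvALoop, if_neg h]; simp

-- len(set(x :: hs)) == 1  ↔  every element equals x
theorem setlen_one_iff (x : String) (hs : List String) :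
    PySem.Set.len (PySem.Set.ofList (x :: hs)) = 1 ↔ ∀ h ∈ hs, h = x := by
  constructor
  · intro h1 h hmem
    have hx : x ∈ PySem.Set.ofList (x :: hs) := (PySem.Set.mem_ofList _ _).mpr (by simp)
    have hh : h ∈ PySem.Set.ofList (x :: hs) := (PySem.Set.mem_ofList _ _).mpr (by simp [hmem])
    cases hs' : PySem.Set.ofList (x :: hs) with
    | nil => rw [hs'] at hx; cases hx
    | cons a t =>
      have ht : t = [] := by
        have := h1
        rw [hs'] at this
        simpa [PySem.Set.len, List.length_eq_zero_iff] using this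
      rw [hs', ht] at hx hh
      simp at hx hh
      rw [hh, hx]
  · intro hall
    have : PySem.Set.ofList (x :: hs) = [x] := by
      have hsub : ∀ y ∈ PySem.Set.ofList (x :: hs), y = x := by
        intro y hy
        have hy' : y ∈ x :: hs := (PySem.Set.mem_ofList _ _).mp hy
        rcases List.mem_cons.mp hy' with h | h
        · exact h
        · exact hall y h
      have hx : x ∈ PySem.Set.ofList (x :: hs) := (PySem.Set.mem_ofList _ _).mpr (by simp)
      have hnd : (PySem.Set.ofList (x :: hs)).Nodup := PySem.Set.nodup_ofList _
      cases hs' : PySem.Set.ofList (x :: hs) with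
      | nil => rw [hs'] at hx; cases hx
      | cons a t =>
        rw [hs'] at hsub hnd
        have ha : a = x := hsub a (by simp)
        cases t with
        | nil => rw [ha]
        | cons b u =>
          have hb : b = x := hsub b (by simp)
          rw [ha, hb] at hnd
          simp at hnd
    simp [this, PySem.Set.len]

-- all members of rest are x-headed ⇒ fold peels x
theorem foldl_pvCp_cons (x : String) (t : List String) (rest : List (List String))
    (h : ∀ r ∈ rest, ∃ tr, r = x :: tr) :
    rest.foldl pvCp (x :: t) = x :: (rest.map List.tail).foldl pvCp t := by
  induction rest generalizing t with
  | nil => simp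
  | cons r rs ih =>
    obtain ⟨tr, htr⟩ := h r (by simp)
    subst htr
    simp only [List.foldl_cons, List.map_cons, List.tail_cons]
    rw [show pvCp (x :: t) (x :: tr) = x :: pvCp t tr from by simp [pvCp]]
    exact ih (pvCp t tr) (fun r hr => h r (by simp [hr]))

-- main lemma: A's column scan equals the fold of pairwise common prefixes
theorem main_lemma (l : List String) (rest : List (List String)) :
    pvALoop (pvZip (l :: rest)) [] = rest.foldl pvCp l := by
  induction l generalizing rest with
  | nil =>
    rw [pvZip, dif_pos (by simp)]
    simp [pvALoop, foldl_pvCp_nil]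
  | cons x t ih =>
    by_cases hemp : [] ∈ rest
    · rw [pvZip, dif_pos (Or.inr (by rw [List.any_eq_true]; exact ⟨[], by simp [hemp]⟩))]
      simp [pvALoop, foldl_pvCp_mem_nil rest (x :: t) hemp]
    · have hno : ¬((x :: t) :: rest).any (·.isEmpty) := by
        rw [List.any_eq_true]
        rintro ⟨r, hr, hre⟩
        rcases List.mem_cons.mp hr with h | h
        · simp [h] at hre
        · rw [List.isEmpty_iff] at hre; exact hemp (hre ▸ h)
      rw [pvZip, dif_neg (by simp [hno])]
      by_cases hall : ∀ r ∈ rest, r.headD "" = x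
      · have hheads : PySem.Set.len (PySem.Set.ofList (((x :: t) :: rest).map (fun l => l.headD ""))) = 1 := by
          simp only [List.map_cons, List.headD_cons]
          rw [setlen_one_iff]
          intro h hm
          obtain ⟨r, hr, hrh⟩ := List.mem_map.mp hm
          exact hrh ▸ hall r hr
        rw [pvALoop, if_pos hheads]
        rw [pvALoop_append]
        have hcons : ∀ r ∈ rest, ∃ tr, r = x :: tr := by
          intro r hr
          cases r with
          | nil => exact absurd hr hemp
          | cons a b => exact ⟨b, by rw [hall (a :: b) hr |>.symm]; simp⟩
        rw [foldl_pvCp_cons x t rest hcons]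
        simp only [List.map_cons, List.tail_cons]
        rw [← ih (rest.map List.tail)]
        simp
      · push_neg at hall
        obtain ⟨r, hr, hrx⟩ := hall
        have hheads : ¬ PySem.Set.len (PySem.Set.ofList (((x :: t) :: rest).map (fun l => l.headD ""))) = 1 := by
          simp only [List.map_cons, List.headD_cons]
          rw [setlen_one_iff]
          intro hcl
          exact hrx (hcl (r.headD "") (List.mem_map.mpr ⟨r, hr, rfl⟩))
        rw [pvALoop, if_neg hheads]
        -- fold result must be []: it is a prefix of x::t and of some mismatching r
        cases hres : rest.foldl pvCp (x :: t) with
        | nil => rfl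
        | cons y ys =>
          exfalso
          have h1 : (y :: ys) <+: (x :: t) := hres ▸ foldl_pvCp_prefix_init rest (x :: t)
          have h2 : (y :: ys) <+: r := hres ▸ foldl_pvCp_prefix_mem rest (x :: t) r hr
          have hyx : y = x := by
            obtain ⟨s, hs⟩ := h1
            simp only [List.cons_append, List.cons.injEq] at hs
            exact hs.1
          obtain ⟨s2, hs2⟩ := h2
          have : r.headD "" = y := by rw [← hs2]; simp
          exact hrx (hyx ▸ this)

-- ===== VERDICT (by name: the statement is the Claim_ definition above) =====
theorem get_common_branch_prefix_spec : Claim_equal_get_common_branch_prefix := by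
  intro branches _
  unfold Spec_get_common_branch_prefix
  cases branches with
  | nil => rfl
  | cons b rest =>
    show get_common_branch_prefix (b :: rest) = get_common_branch_prefix_alt (b :: rest)
    rw [get_common_branch_prefix, if_neg (by simp), get_common_branch_prefix_alt]
    rw [pvBLoop_eq_foldl]
    simp only [List.map_cons]
    rw [main_lemma (pvSplit b) (rest.map pvSplit), List.foldl_map]
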